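-- pv_equiv track=rewrite | github.com/kodsnack/advent_of_code_2018 | erikdyrelius-python/day13.py | removeColl
-- ===== SOURCE A (Python) =====
-- def removeColl(d, ci):
--     for i in range(len(d)-1):
--         for j in range(i+1, len(d)):
--             if d[i][:2] == d[j][:2]:
--                 d[j:j+1] = []
--                 d[i:i+1] = []
--                 if i < ci:
--                     ci -= 2
--                 else:
--                     ci -= 1
--                 return d, ci
-- ===== SOURCE B (Python) =====
-- # Alternative single pass: dict of first occurrence of each (x,y) key; keep the
-- # lexicographically smallest colliding pair (i, j). Mutates d like A does.
-- def removeColl(d, ci):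
--     first = {}
--     best = None
--     for j, cart in enumerate(d):
--         key = tuple(cart[:2])
--         if key in first:
--             cand = (first[key], j)
--             if best is None or cand < best:
--                 best = cand
--         else:
--             first[key] = j
--     if best is None:
--         return None
--     i, j = best
--     del d[j]
--     del d[i]
--     return d, ci - (2 if i < ci else 1)
-- ===== Notes on version B (the rewrite author's own statement) =====
-- stated objective: alternative
-- what changed: Replaces A's nested scan over all index pairs by a single pass that hashes the first occurrence of each position key and keeps the lexicographically smallest colliding (i, j) pair.
import Mathlib
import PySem

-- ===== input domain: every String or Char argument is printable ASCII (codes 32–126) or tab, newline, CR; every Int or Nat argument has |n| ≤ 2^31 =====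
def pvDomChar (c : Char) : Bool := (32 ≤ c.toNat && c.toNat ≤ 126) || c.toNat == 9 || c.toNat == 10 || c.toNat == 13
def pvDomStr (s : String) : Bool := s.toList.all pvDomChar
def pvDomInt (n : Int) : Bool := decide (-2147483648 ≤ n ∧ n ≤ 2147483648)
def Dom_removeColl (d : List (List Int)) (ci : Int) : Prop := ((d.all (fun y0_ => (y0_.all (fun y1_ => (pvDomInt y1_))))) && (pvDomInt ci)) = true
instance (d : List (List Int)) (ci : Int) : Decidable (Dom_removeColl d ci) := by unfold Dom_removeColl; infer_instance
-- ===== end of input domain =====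

-- B replaces A's nested pair scan by one pass with a first-occurrence dict,
-- keeping the lexicographically smallest colliding pair (objective: alternative).
-- Both Pythons mutate d in place; the equivalence proved here is about the return value.

-- ===== PORT A =====
-- range(len(d)-1) → List.range (Nat subtraction matches Python's empty range for len 0);
-- range(i+1, len(d)) → List.range'; d[i][:2] → getD + take (exact: i is always in range);
-- d[j:j+1] = [] then d[i:i+1] = [] → eraseIdx j then eraseIdx i (i < j).
def removeColl (d : List (List Int)) (ci : Int) : Option (List (List Int) × Int) :=
  (List.range (d.length - 1)).findSome? (fun i =>
    (List.range' (i + 1) (d.length - (i + 1))).findSome? (fun j =>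
      if (d.getD i []).take 2 = (d.getD j []).take 2 then
        some ((d.eraseIdx j).eraseIdx i, if (i : Int) < ci then ci - 2 else ci - 1)
      else none))

-- ===== PORT B =====
-- the single pass of Source B: `first` is the dict key → first index, `best` the smallest
-- colliding (i, j) pair so far in lexicographic tuple order (Python's `cand < best`).
def findBest : List (List Int) → Nat → PySem.Dict (List Int) Nat → Option (Nat × Nat) →
    Option (Nat × Nat)
  | [], _, _, best => best
  | c :: rest, j, first, best =>
    let key := c.take 2
    match first.get? key with
    | some i =>
      let best' :=
        match best with
        | none => some (i, j)
        | some b => if i < b.1 ∨ (i = b.1 ∧ j < b.2) then some (i, j) else some b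
      findBest rest (j + 1) first best'
    | none => findBest rest (j + 1) (first.insert key j) best

def removeColl_alt (d : List (List Int)) (ci : Int) : Option (List (List Int) × Int) :=
  match findBest d 0 PySem.Dict.empty none with
  | none => none
  | some (i, j) =>
    some ((d.eraseIdx j).eraseIdx i, ci - (if (i : Int) < ci then 2 else 1))

-- ===== PRECONDITION & SPEC =====
def Spec_removeColl (d : List (List Int)) (ci : Int) (out : Option (List (List Int) × Int)) : Prop := out = removeColl_alt d ci
instance (d : List (List Int)) (ci : Int) (out : Option (List (List Int) × Int)) : Decidable (Spec_removeColl d ci out) := by unfold Spec_removeColl; infer_instance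

-- ===== CLAIM (what is proved, stated in full; the proofs are below) =====
def Claim_equal_removeColl : Prop := ∀ (d : List (List Int)) (ci : Int), Dom_removeColl d ci → Spec_removeColl d ci (removeColl d ci)

-- ===== LEMMAS AND PROOFS =====

def keyAt (d : List (List Int)) (k : Nat) : List Int := (d.getD k []).take 2

-- colliding index pairs with both indices below j
def CollB (d : List (List Int)) (j : Nat) (p : Nat × Nat) : Prop :=
  p.1 < p.2 ∧ p.2 < j ∧ keyAt d p.1 = keyAt d p.2

def lexLe (a b : Nat × Nat) : Prop := a.1 < b.1 ∨ (a.1 = b.1 ∧ a.2 ≤ b.2)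

def IsMinPair (d : List (List Int)) (j : Nat) (o : Option (Nat × Nat)) : Prop :=
  match o with
  | none => ∀ p, ¬ CollB d j p
  | some m => CollB d j m ∧ ∀ p, CollB d j p → lexLe m p

-- A's pair search, with the output construction stripped off
def pairA (d : List (List Int)) : Option (Nat × Nat) :=
  (List.range (d.length - 1)).findSome? (fun i =>
    (List.range' (i + 1) (d.length - (i + 1))).findSome? (fun j =>
      if keyAt d i = keyAt d j then some (i, j) else none))

theorem fs_none {α : Type} (f : Nat → Option α) :
    ∀ (len a : Nat), (List.range' a len).findSome? f = none →
      ∀ x, a ≤ x → x < a + len → f x = none := by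
  intro len
  induction len with
  | zero => intro a _ x hax hx; omega
  | succ n ih =>
    intro a h x hax hx
    rw [List.range'_succ, List.findSome?_cons] at h
    cases hfa : f a with
    | some v => rw [hfa] at h; simp at h
    | none =>
      rw [hfa] at h
      rcases Nat.eq_or_lt_of_le hax with rfl | hlt
      · exact hfa
      · exact ih (a + 1) h x hlt (by omega)

theorem fs_some {α : Type} (f : Nat → Option α) :
    ∀ (len a : Nat) (v : α), (List.range' a len).findSome? f = some v →
      ∃ x, a ≤ x ∧ x < a + len ∧ f x = some v ∧ ∀ y, a ≤ y → y < x → f y = none := by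
  intro len
  induction len with
  | zero => intro a v h; simp at h
  | succ n ih =>
    intro a v h
    rw [List.range'_succ, List.findSome?_cons] at h
    cases hfa : f a with
    | some w =>
      rw [hfa] at h
      refine ⟨a, le_refl a, by omega, by rw [hfa, ← h], ?_⟩
      intro y hay hya; omega
    | none =>
      rw [hfa] at h
      obtain ⟨x, hx1, hx2, hx3, hx4⟩ := ih (a + 1) v h
      refine ⟨x, by omega, by omega, hx3, ?_⟩
      intro y hay hyx
      rcases Nat.eq_or_lt_of_le hay with rfl | hlt
      · exact hfa
      · exact hx4 y hlt hyx

theorem pairA_isMin (d : List (List Int)) : IsMinPair d d.length (pairA d) := by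
  cases h : pairA d with
  | none =>
    intro p hp
    obtain ⟨i, j⟩ := p
    obtain ⟨h1, h2, h3⟩ := hp
    unfold pairA at h; rw [List.range_eq_range'] at h
    have hi := fs_none _ _ _ h i (by omega) (by omega)
    have hj := fs_none _ _ _ hi j (by omega) (by omega)
    rw [if_pos h3] at hj
    simp at hj
  | some m =>
    unfold pairA at h; rw [List.range_eq_range'] at h
    obtain ⟨i, hi0, hin, hinner, houtmin⟩ := fs_some _ _ _ _ h
    obtain ⟨j, hij, hjn, hif, hinmin⟩ := fs_some _ _ _ _ hinner
    have hkey : keyAt d i = keyAt d j := by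
      by_contra hc; rw [if_neg hc] at hif; simp at hif
    rw [if_pos hkey] at hif
    have hm : (i, j) = m := Option.some.inj hif
    subst hm
    refine ⟨⟨by omega, by omega, hkey⟩, ?_⟩
    intro p hp
    obtain ⟨i', j'⟩ := p
    obtain ⟨h1, h2, h3⟩ := hp
    by_cases hii : i' < i
    · have hz := fs_none _ _ _ (houtmin i' (by omega) hii) j' (by omega) (by omega)
      rw [if_pos h3] at hz
      exact absurd hz (by simp)
    · by_cases hieq : i = i'
      · subst hieq
        by_cases hjj : j' < j
        · have hz := hinmin j' (by omega) hjj
          rw [if_pos h3] at hz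
          exact absurd hz (by simp)
        · exact Or.inr ⟨rfl, by omega⟩
      · exact Or.inl (by omega)

def FirstInvA (d : List (List Int)) (j : Nat) (first : PySem.Dict (List Int) Nat) : Prop :=
  ∀ K i, first.get? K = some i → i < j ∧ keyAt d i = K ∧ ∀ i', i' < i → keyAt d i' ≠ K

def FirstInvB (d : List (List Int)) (j : Nat) (first : PySem.Dict (List Int) Nat) : Prop :=
  ∀ K, first.get? K = none → ∀ i, i < j → keyAt d i ≠ K

theorem findBest_isMin (d : List (List Int)) :
    ∀ (rest : List (List Int)) (j : Nat) (first : PySem.Dict (List Int) Nat)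
      (best : Option (Nat × Nat)),
      rest = d.drop j → j ≤ d.length → FirstInvA d j first → FirstInvB d j first →
      IsMinPair d j best → IsMinPair d d.length (findBest rest j first best) := by
  intro rest
  induction rest with
  | nil =>
    intro j first best hdrop hj _ _ hmin
    have hlen : d.length ≤ j := List.drop_eq_nil_iff.mp hdrop.symm
    have hje : j = d.length := le_antisymm hj hlen
    simpa only [findBest, ← hje] using hmin
  | cons c rest ih =>
    intro j first best hdrop hj hA hB hmin
    have hlt : j < d.length := by
      by_contra hc
      rw [List.drop_eq_nil_of_le (by omega)] at hdrop
      simp at hdrop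
    have hget : d[j]? = some c := by
      have h0 : (d.drop j)[0]? = some c := by rw [← hdrop]; rfl
      rw [List.getElem?_drop] at h0
      simpa using h0
    have hkeyj : keyAt d j = c.take 2 := by
      unfold keyAt
      rw [List.getD_eq_getElem?_getD, hget]
      rfl
    have hrest : rest = d.drop (j + 1) := by
      have h1 : (d.drop j).drop 1 = d.drop (j + 1) := by
        rw [List.drop_drop]
      rw [← h1, ← hdrop]
      rfl
    simp only [findBest]
    cases hg : first.get? (c.take 2) with
    | some i =>
      obtain ⟨hij, hkeyi, hmini⟩ := hA _ _ hg
      have hkeysij : keyAt d i = keyAt d j := by rw [hkeyi, hkeyj]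
      have hnew : ∀ i', i' < j → keyAt d i' = keyAt d j → i ≤ i' := by
        intro i' h1 h2
        by_contra hc
        exact hmini i' (by omega) (by rw [h2, hkeyj])
      refine ih (j + 1) first _ hrest (by omega) ?_ ?_ ?_
      · intro K i0 h0
        obtain ⟨ha, hb', hc'⟩ := hA K i0 h0
        exact ⟨by omega, hb', hc'⟩
      · intro K hK i0 hi0
        rcases Nat.lt_or_ge i0 j with h | h
        · exact hB K hK i0 h
        · have : i0 = j := by omega
          subst this
          rw [hkeyj]
          intro hKeq
          rw [hKeq] at hg
          rw [hg] at hK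
          simp at hK
      · cases best with
        | none =>
          refine ⟨⟨hij, by omega, hkeysij⟩, ?_⟩
          intro p hp
          obtain ⟨i', j'⟩ := p
          obtain ⟨h1, h2, h3⟩ := hp
          rcases Nat.lt_or_ge j' j with hlt' | hge
          · exact absurd ⟨h1, hlt', h3⟩ (hmin (i', j'))
          · have hj' : j' = j := by omega
            subst hj'
            have hile := hnew i' h1 h3
            rcases Nat.lt_or_ge i i' with h | h
            · exact Or.inl h
            · exact Or.inr ⟨by omega, Nat.le_refl _⟩
        | some b =>
          show IsMinPair d (j + 1)
            (if i < b.1 ∨ (i = b.1 ∧ j < b.2) then some (i, j) else some b)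
          obtain ⟨hbc, hbmin⟩ := hmin
          have hcover : ∀ p, CollB d (j + 1) p → lexLe b p ∨ lexLe (i, j) p := by
            intro p hp
            obtain ⟨i', j'⟩ := p
            obtain ⟨h1, h2, h3⟩ := hp
            rcases Nat.lt_or_ge j' j with hlt' | hge
            · exact Or.inl (hbmin (i', j') ⟨h1, hlt', h3⟩)
            · have hj' : j' = j := by omega
              subst hj'
              have hile := hnew i' h1 h3
              right
              unfold lexLe
              simp only []
              omega
          split_ifs with hcb
          · refine ⟨⟨hij, by omega, hkeysij⟩, ?_⟩
            intro p hp
            have h2 := hcover p hp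
            obtain ⟨i', j'⟩ := p
            unfold lexLe at h2 ⊢
            omega
          · refine ⟨⟨hbc.1, by have := hbc.2.1; omega, hbc.2.2⟩, ?_⟩
            intro p hp
            have h2 := hcover p hp
            obtain ⟨i', j'⟩ := p
            unfold lexLe at h2 ⊢
            simp only [not_or, not_lt, not_and] at hcb
            omega
    | none =>
      refine ih (j + 1) (first.insert (c.take 2) j) best hrest (by omega) ?_ ?_ ?_
      · intro K i0 h0
        rw [PySem.Dict.get?_insert] at h0
        by_cases hKk : K = c.take 2
        · rw [if_pos hKk] at h0
          have hej : i0 = j := (Option.some.inj h0).symm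
          subst hej
          refine ⟨by omega, by rw [hkeyj]; exact hKk.symm, ?_⟩
          intro i' hi'
          exact hB K (by rw [hKk]; exact hg) i' hi'
        · rw [if_neg hKk] at h0
          obtain ⟨ha, hb', hc'⟩ := hA K i0 h0
          exact ⟨by omega, hb', hc'⟩
      · intro K hK i0 hi0
        rw [PySem.Dict.get?_insert] at hK
        by_cases hKk : K = c.take 2
        · rw [if_pos hKk] at hK; simp at hK
        · rw [if_neg hKk] at hK
          rcases Nat.lt_or_ge i0 j with h | h
          · exact hB K hK i0 h
          · have : i0 = j := by omega
            subst this
            rw [hkeyj]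
            exact fun he => hKk he.symm
      · have hnocoll : ∀ i', i' < j → keyAt d i' ≠ keyAt d j := by
          intro i' h1
          rw [hkeyj]
          exact hB (c.take 2) hg i' h1
        cases best with
        | none =>
          intro p hp
          obtain ⟨i', j'⟩ := p
          obtain ⟨h1, h2, h3⟩ := hp
          rcases Nat.lt_or_ge j' j with hlt' | hge
          · exact hmin (i', j') ⟨h1, hlt', h3⟩
          · have hj' : j' = j := by omega
            subst hj'
            exact hnocoll i' h1 h3
        | some b =>
          obtain ⟨hbc, hbmin⟩ := hmin
          refine ⟨⟨hbc.1, by have := hbc.2.1; omega, hbc.2.2⟩, ?_⟩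
          intro p hp
          obtain ⟨i', j'⟩ := p
          obtain ⟨h1, h2, h3⟩ := hp
          rcases Nat.lt_or_ge j' j with hlt' | hge
          · exact hbmin (i', j') ⟨h1, hlt', h3⟩
          · have hj' : j' = j := by omega
            subst hj'
            exact absurd h3 (hnocoll i' h1)

theorem isMin_unique (d : List (List Int)) (n : Nat) (o1 o2 : Option (Nat × Nat))
    (h1 : IsMinPair d n o1) (h2 : IsMinPair d n o2) : o1 = o2 := by
  cases o1 with
  | none =>
    cases o2 with
    | none => rfl
    | some m2 => exact absurd h2.1 (h1 m2)
  | some m1 =>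
    cases o2 with
    | none => exact absurd h1.1 (h2 m1)
    | some m2 =>
      have l1 := h1.2 m2 h2.1
      have l2 := h2.2 m1 h1.1
      obtain ⟨a1, b1⟩ := m1
      obtain ⟨a2, b2⟩ := m2
      unfold lexLe at l1 l2
      refine congrArg some (Prod.ext ?_ ?_) <;> [skip; skip] <;> simp at l1 l2 ⊢ <;> omega

theorem pairA_eq_findBest (d : List (List Int)) :
    pairA d = findBest d 0 PySem.Dict.empty none := by
  refine isMin_unique d d.length _ _ (pairA_isMin d) ?_
  refine findBest_isMin d d 0 PySem.Dict.empty none (by simp : d = List.drop 0 d) (Nat.zero_le _) ?_ ?_ ?_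
  · intro K i h
    rw [PySem.Dict.get?_empty] at h
    simp at h
  · intro K _ i hi
    exact absurd hi (Nat.not_lt_zero i)
  · intro p hp
    exact absurd hp.2.1 (Nat.not_lt_zero _)

theorem findSome?_comp_map {α β : Type} (f : α → β) :
    ∀ (l : List Nat) (g : Nat → Option α),
      l.findSome? (fun x => (g x).map f) = (l.findSome? g).map f := by
  intro l g
  induction l with
  | nil => rfl
  | cons a l ih =>
    rw [List.findSome?_cons, List.findSome?_cons]
    cases g a <;> simp [ih]

theorem removeColl_eq_map (d : List (List Int)) (ci : Int) :
    removeColl d ci = (pairA d).map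
      (fun p => ((d.eraseIdx p.2).eraseIdx p.1,
        if (p.1 : Int) < ci then ci - 2 else ci - 1)) := by
  have hfun : ∀ i : Nat,
      (List.range' (i + 1) (d.length - (i + 1))).findSome? (fun j =>
        if (d.getD i []).take 2 = (d.getD j []).take 2 then
          some ((d.eraseIdx j).eraseIdx i, if (i : Int) < ci then ci - 2 else ci - 1)
        else none)
      = ((List.range' (i + 1) (d.length - (i + 1))).findSome? (fun j =>
          if keyAt d i = keyAt d j then some (i, j) else none)).map
          (fun p => ((d.eraseIdx p.2).eraseIdx p.1,
            if (p.1 : Int) < ci then ci - 2 else ci - 1)) := by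
    intro i
    rw [← findSome?_comp_map]
    refine congrArg (fun f => List.findSome? f _) (funext fun j => ?_)
    unfold keyAt
    split_ifs with h1 h2 <;> simp [*]
  unfold removeColl pairA
  rw [← findSome?_comp_map]
  exact congrArg (fun f => List.findSome? f _) (funext hfun)

-- ===== VERDICT (by name: the statement is the Claim_ definition above) =====
theorem removeColl_spec : Claim_equal_removeColl := by
  intro d ci _
  unfold Spec_removeColl removeColl_alt
  rw [removeColl_eq_map, pairA_eq_findBest]
  cases h : findBest d 0 PySem.Dict.empty none with
  | none => rfl
  | some m =>
    obtain ⟨i, j⟩ := m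
    simp only [Option.map_some]
    refine congrArg some (Prod.ext rfl ?_)
    by_cases hlt : (i : Int) < ci <;> simp [hlt]
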